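-- pv_equiv track=rewrite | github.com/JaredTherriault/ComfyUI-JNodes | py/prompting_nodes.py | separate_string_by_delimiters
-- ===== SOURCE A (Python) =====
-- def separate_string_by_delimiters(input_string, delimiter_a, delimiter_b, delimiter_c):
--
--     """
--     This function processes a multiline string and separates it into four different strings based on
--     the given delimiters. The string is split into lines, and each line is checked to see if it starts
--     with one of the delimiters. The function removes the delimiter from each line and retains the newline
--     character so that the output strings maintain the original formatting.
--
--     Parameters:
--     - input_string (str): The multiline string that needs to be processed.
--     - delimiter_a (str): The delimiter to check for the first category.
--     - delimiter_b (str): The delimiter to check for the second category.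
--     - delimiter_c (str): The delimiter to check for the third category.
--
--     Returns:
--     - tuple: A tuple containing four strings:
--         - string_all (str): Lines that do not start with any of the delimiters.
--         - string_a (str): Lines that start with delimiter_a, with the delimiter removed.
--         - string_b (str): Lines that start with delimiter_b, with the delimiter removed.
--         - string_c (str): Lines that start with delimiter_c, with the delimiter removed.
--     """
--
--     # Initialize the four result strings
--     string_all = ""
--     string_a = ""
--     string_b = ""
--     string_c = ""
--
--     # Split the input string into lines
--     lines = input_string.splitlines()
--
--     # Process each line
--     for line in lines:
--         line = line.strip()
--         if line.startswith(delimiter_a):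
--             string_a += line[len(delimiter_a):] + "\n"  # Remove delimiter_a and retain the newline
--         elif line.startswith(delimiter_b):
--             string_b += line[len(delimiter_b):] + "\n"  # Remove delimiter_b and retain the newline
--         elif line.startswith(delimiter_c):
--             string_c += line[len(delimiter_c):] + "\n"  # Remove delimiter_c and retain the newline
--         else:
--             string_all += line + "\n"  # For lines not starting with any delimiter
--
--     return (string_all, string_a, string_b, string_c,)
-- ===== SOURCE B (Python) =====
-- def separate_string_by_delimiters(input_string, delimiter_a, delimiter_b, delimiter_c):
--     lines = [line.strip() for line in input_string.splitlines()]
--     is_a = lambda l: l.startswith(delimiter_a)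
--     is_b = lambda l: not is_a(l) and l.startswith(delimiter_b)
--     is_c = lambda l: not is_a(l) and not is_b(l) and l.startswith(delimiter_c)
--     is_rest = lambda l: not is_a(l) and not is_b(l) and not is_c(l)
--     string_all = "".join(l + "\n" for l in lines if is_rest(l))
--     string_a = "".join(l.removeprefix(delimiter_a) + "\n" for l in lines if is_a(l))
--     string_b = "".join(l.removeprefix(delimiter_b) + "\n" for l in lines if is_b(l))
--     string_c = "".join(l.removeprefix(delimiter_c) + "\n" for l in lines if is_c(l))
--     return (string_all, string_a, string_b, string_c)
-- ===== Notes on version B (the rewrite author's own statement) =====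
-- stated objective: alternative
-- what changed: Replaces A's single loop with four mutable string accumulators and an if/elif chain by four independent declarative filter-and-join passes over the pre-stripped lines, with the elif priority expressed as negated-prefix guards and str.removeprefix.
import Mathlib
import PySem

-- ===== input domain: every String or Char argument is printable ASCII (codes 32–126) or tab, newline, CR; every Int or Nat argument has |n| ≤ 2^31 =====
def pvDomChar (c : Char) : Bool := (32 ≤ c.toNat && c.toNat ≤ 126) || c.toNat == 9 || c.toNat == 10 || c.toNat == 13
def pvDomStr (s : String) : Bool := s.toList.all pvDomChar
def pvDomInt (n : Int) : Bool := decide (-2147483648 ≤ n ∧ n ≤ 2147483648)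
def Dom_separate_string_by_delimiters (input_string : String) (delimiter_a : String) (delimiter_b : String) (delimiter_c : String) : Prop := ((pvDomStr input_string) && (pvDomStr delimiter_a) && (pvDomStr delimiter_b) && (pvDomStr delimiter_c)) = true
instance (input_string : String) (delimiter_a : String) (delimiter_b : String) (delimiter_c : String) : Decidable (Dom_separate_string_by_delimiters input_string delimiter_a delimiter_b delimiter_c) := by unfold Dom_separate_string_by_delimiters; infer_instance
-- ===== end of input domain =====

-- B replaces A's single accumulator loop with four independent filter-and-join passes
-- over the pre-stripped lines (objective: a different, more declarative decomposition).

-- ===== PORT A =====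
-- A's loop body: strip the line, then the if/elif/elif/else chain updating one of the
-- four accumulated strings (kept as List Char; 'line[len(d):]' is Chars.slice).
def pvAStep (da db dc : List Char) (st : List Char × List Char × List Char × List Char)
    (line0 : List Char) : List Char × List Char × List Char × List Char :=
  let line := PySem.Chars.strip line0
  if PySem.Chars.startswith line da then
    (st.1, st.2.1 ++ PySem.Chars.slice line (some (PySem.Chars.len da : Int)) none ++ ['\n'], st.2.2.1, st.2.2.2)
  else if PySem.Chars.startswith line db then
    (st.1, st.2.1, st.2.2.1 ++ PySem.Chars.slice line (some (PySem.Chars.len db : Int)) none ++ ['\n'], st.2.2.2)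
  else if PySem.Chars.startswith line dc then
    (st.1, st.2.1, st.2.2.1, st.2.2.2 ++ PySem.Chars.slice line (some (PySem.Chars.len dc : Int)) none ++ ['\n'])
  else
    (st.1 ++ line ++ ['\n'], st.2.1, st.2.2.1, st.2.2.2)

def separate_string_by_delimiters (input_string : String) (delimiter_a : String) (delimiter_b : String) (delimiter_c : String) : String × String × String × String :=
  let r := (PySem.Chars.splitlines input_string.toList).foldl
      (pvAStep delimiter_a.toList delimiter_b.toList delimiter_c.toList) ([], [], [], [])
  (String.ofList r.1, String.ofList r.2.1, String.ofList r.2.2.1, String.ofList r.2.2.2)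

-- ===== PORT B =====
-- Source B's bucket predicates: the elif priority expressed as negated-prefix guards.
def pvIsA (da l : List Char) : Bool := PySem.Chars.startswith l da
def pvIsB (da db l : List Char) : Bool := !pvIsA da l && PySem.Chars.startswith l db
def pvIsC (da db dc l : List Char) : Bool := !pvIsA da l && !pvIsB da db l && PySem.Chars.startswith l dc
def pvIsRest (da db dc l : List Char) : Bool := !pvIsA da l && !pvIsB da db l && !pvIsC da db dc l

-- str.removeprefix
def pvRemovePrefix (l d : List Char) : List Char :=
  if PySem.Chars.startswith l d then l.drop d.length else l

def separate_string_by_delimiters_alt (input_string : String) (delimiter_a : String) (delimiter_b : String) (delimiter_c : String) : String × String × String × String :=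
  let A := delimiter_a.toList
  let B := delimiter_b.toList
  let C := delimiter_c.toList
  let lines := (PySem.Chars.splitlines input_string.toList).map PySem.Chars.strip
  let sAll := PySem.Chars.join [] ((lines.filter (pvIsRest A B C)).map (fun l => l ++ ['\n']))
  let sA := PySem.Chars.join [] ((lines.filter (pvIsA A)).map (fun l => pvRemovePrefix l A ++ ['\n']))
  let sB := PySem.Chars.join [] ((lines.filter (pvIsB A B)).map (fun l => pvRemovePrefix l B ++ ['\n']))
  let sC := PySem.Chars.join [] ((lines.filter (pvIsC A B C)).map (fun l => pvRemovePrefix l C ++ ['\n']))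
  (String.ofList sAll, String.ofList sA, String.ofList sB, String.ofList sC)

-- ===== PRECONDITION & SPEC =====
def Spec_separate_string_by_delimiters (input_string : String) (delimiter_a : String) (delimiter_b : String) (delimiter_c : String) (out : String × String × String × String) : Prop := out = separate_string_by_delimiters_alt input_string delimiter_a delimiter_b delimiter_c
instance (input_string : String) (delimiter_a : String) (delimiter_b : String) (delimiter_c : String) (out : String × String × String × String) : Decidable (Spec_separate_string_by_delimiters input_string delimiter_a delimiter_b delimiter_c out) := by unfold Spec_separate_string_by_delimiters; infer_instance

-- ===== CLAIM (what is proved, stated in full; the proofs are below) =====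
def Claim_equal_separate_string_by_delimiters : Prop := ∀ (input_string : String) (delimiter_a : String) (delimiter_b : String) (delimiter_c : String), Dom_separate_string_by_delimiters input_string delimiter_a delimiter_b delimiter_c → Spec_separate_string_by_delimiters input_string delimiter_a delimiter_b delimiter_c (separate_string_by_delimiters input_string delimiter_a delimiter_b delimiter_c)

-- ===== LEMMAS AND PROOFS =====

-- "".join of char-lists is concatenation
theorem pvJoin_nil_eq_flatten (parts : List (List Char)) :
    PySem.Chars.join [] parts = parts.flatten := by
  simp [PySem.Chars.join, List.intercalate]
  induction parts with
  | nil => rfl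
  | cons x xs ih => cases xs <;> simp_all [List.intersperse]

-- A's loop, run from any state, appends exactly B's four filtered joins.
theorem pvA_loop (A B C : List Char) (lines : List (List Char))
    (st : List Char × List Char × List Char × List Char) :
    lines.foldl (pvAStep A B C) st =
      (st.1 ++ (((lines.map PySem.Chars.strip).filter (pvIsRest A B C)).map (fun l => l ++ ['\n'])).flatten,
       st.2.1 ++ (((lines.map PySem.Chars.strip).filter (pvIsA A)).map (fun l => pvRemovePrefix l A ++ ['\n'])).flatten,
       st.2.2.1 ++ (((lines.map PySem.Chars.strip).filter (pvIsB A B)).map (fun l => pvRemovePrefix l B ++ ['\n'])).flatten,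
       st.2.2.2 ++ (((lines.map PySem.Chars.strip).filter (pvIsC A B C)).map (fun l => pvRemovePrefix l C ++ ['\n'])).flatten) := by
  induction lines generalizing st with
  | nil => simp
  | cons x xs ih =>
    rw [List.foldl_cons, ih]
    simp only [List.map_cons, List.filter_cons]
    by_cases hA : PySem.Chars.startswith (PySem.Chars.strip x) A = true
    · simp [pvAStep, pvIsA, pvIsB, pvIsC, pvIsRest, pvRemovePrefix, hA,
        PySem.Chars.slice_eq_listSlice, PySem.List.slice_from_natCast]
    · by_cases hB : PySem.Chars.startswith (PySem.Chars.strip x) B = true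
      · simp [pvAStep, pvIsA, pvIsB, pvIsC, pvIsRest, pvRemovePrefix, hA, hB,
          PySem.Chars.slice_eq_listSlice, PySem.List.slice_from_natCast]
      · by_cases hC : PySem.Chars.startswith (PySem.Chars.strip x) C = true
        · simp [pvAStep, pvIsA, pvIsB, pvIsC, pvIsRest, pvRemovePrefix, hA, hB, hC,
            PySem.Chars.slice_eq_listSlice, PySem.List.slice_from_natCast]
        · simp [pvAStep, pvIsA, pvIsB, pvIsC, pvIsRest, hA, hB, hC]

-- ===== VERDICT (by name: the statement is the Claim_ definition above) =====
theorem separate_string_by_delimiters_spec : Claim_equal_separate_string_by_delimiters := by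
  intro s da db dc _
  unfold Spec_separate_string_by_delimiters separate_string_by_delimiters separate_string_by_delimiters_alt
  rw [pvA_loop]
  simp [pvJoin_nil_eq_flatten]
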